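-- pv_equiv track=rewrite | github.com/victorjws/CtCI-solutions-study | 5. Bit Manipulation/5.3 Flip Bit to Win.py | flip_bit
-- ===== SOURCE A (Python) =====
-- class Integer:
--     BYTES = 4
--
-- def flip_bit(a: int) -> int:
--     # If all 1s, this is already the longest sequence.
--     if ~a == 0:
--         return Integer.BYTES * 8
--
--     current_length = 0
--     previous_length = 0
--     max_length = 1  # We can always have a sequence of at least one 1
--     while a != 0:
--         if (a & 1) == 1:  # Current bit is a 1
--             current_length += 1
--         elif (a & 1) == 0:  # Current bit is a 0
--             # Update to 0 (if next bit is 0) or current_length (if next bit is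
--             # 1).
--             previous_length = 0 if (a & 2) == 0 else current_length
--             current_length = 0
--         max_length = max(previous_length + current_length + 1, max_length)
--         a >>= 1  # a >>>= 1 # in java
--     return max_length
-- ===== SOURCE B (Python) =====
-- class Integer:
--     BYTES = 4
--
--
-- def _best(runs):
--     # runs: alternating (bit, length) run-lengths, LSB first, starting and
--     # ending with a 1-run (a leading 0-run has been dropped by the caller).
--     if not runs:
--         return 1
--     t = runs[0][1]
--     if len(runs) >= 3 and runs[1][1] == 1:
--         # isolated zero between this 1-run and the next: flip it to merge
--         return max(t + runs[2][1] + 1, _best(runs[2:]))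
--     if len(runs) >= 2:
--         return max(t + 1, _best(runs[2:]))
--     return t + 1
--
--
-- def flip_bit(a: int) -> int:
--     # If all 1s, this is already the longest sequence.
--     if ~a == 0:
--         return Integer.BYTES * 8
--     # Pass 1: run-length decomposition of the bits, LSB first.
--     runs = []
--     while a != 0:
--         b = a & 1
--         l = 0
--         while a != 0 and (a & 1) == b:
--             l += 1
--             a >>= 1
--         runs.append((b, l))
--     if runs and runs[0][0] == 0:
--         runs = runs[1:]
--     # Pass 2: best merge over the run list.
--     return _best(runs)
-- ===== Notes on version B (the rewrite author's own statement) =====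
-- stated objective: alternative
-- what changed: B replaces A's single-pass prev/cur dynamic-programming bit loop by a two-phase algorithm: a run-length decomposition of the bits (LSB first) followed by a recursive scan of the run list that merges the two 1-runs around each isolated zero.
import Mathlib
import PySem

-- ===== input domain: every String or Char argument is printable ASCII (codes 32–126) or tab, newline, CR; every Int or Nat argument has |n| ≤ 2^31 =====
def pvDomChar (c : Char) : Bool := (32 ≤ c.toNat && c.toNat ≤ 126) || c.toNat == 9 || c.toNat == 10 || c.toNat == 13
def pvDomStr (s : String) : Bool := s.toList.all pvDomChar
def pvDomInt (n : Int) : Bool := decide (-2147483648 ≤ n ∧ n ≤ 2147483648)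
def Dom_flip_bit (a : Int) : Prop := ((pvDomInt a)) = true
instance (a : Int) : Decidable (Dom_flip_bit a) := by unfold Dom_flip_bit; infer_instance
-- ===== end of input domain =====

-- B replaces A's prev/cur bit-DP loop by run-length decomposition plus a merge scan of the
-- run list (objective: alternative algorithm, same cost); equality proved on Pre_flip_bit.

-- `a & 1` is PySem.Int.mod a 2, `a >> 1` is PySem.Int.floordiv a 2 (exact for every Python
-- int); this termination lemma is cited by the ports' decreasing_by.
theorem pv_half_lt (a : Int) (h : 0 < a) : (PySem.Int.floordiv a 2).toNat < a.toNat := by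
  rw [PySem.Int.floordiv_eq_ediv_of_pos (by norm_num : (0:Int) < 2)]; omega

-- ===== PORT A =====
-- A's `while a != 0` loop: it never terminates for a < 0 (`a >>= 1` keeps a negative int
-- negative), and those inputs are outside Pre_flip_bit; the port stops there to be total.
-- `(a & 2) == 0` is ported as `(a >> 1) & 1 == 0`, exact for every Python int.
def flipLoopA (a cur prev maxl : Int) : Int :=
  if h : 0 < a then
    if PySem.Int.mod a 2 = 1 then
      -- current bit is 1: current_length += 1, then the max_length update
      flipLoopA (PySem.Int.floordiv a 2) (cur + 1) prev (max (prev + (cur + 1) + 1) maxl)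
    else
      -- current bit is 0: previous_length := 0 or current_length, current_length := 0
      let prev' := if PySem.Int.mod (PySem.Int.floordiv a 2) 2 = 0 then 0 else cur
      flipLoopA (PySem.Int.floordiv a 2) 0 prev' (max (prev' + 0 + 1) maxl)
  else maxl
termination_by a.toNat
decreasing_by all_goals exact pv_half_lt a h

-- `~a == 0` holds exactly for a = -1; Integer.BYTES * 8 = 32
def flip_bit (a : Int) : Int :=
  if a = -1 then 32 else flipLoopA a 0 0 1

-- ===== PORT B =====
-- Source B's inner `while a != 0 and (a & 1) == b: l += 1; a >>= 1` (like A it diverges for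
-- a < 0, outside Pre_flip_bit; the port stops there)
def takeRunAux (a b l : Int) : Int × Int :=
  if h : 0 < a ∧ PySem.Int.mod a 2 = b then
    takeRunAux (PySem.Int.floordiv a 2) b (l + 1)
  else (l, a)
termination_by a.toNat
decreasing_by exact pv_half_lt a h.1

-- the next two lemmas are needed by the outer loop's termination proof (`decreasing_by`)
theorem pv_takeRunAux_toNat_le : ∀ (n : Nat) (a b l : Int), a.toNat ≤ n →
    (takeRunAux a b l).2.toNat ≤ a.toNat := by
  intro n
  induction n with
  | zero =>
    intro a b l h
    have hnc : ¬(0 < a ∧ PySem.Int.mod a 2 = b) := fun hc => by omega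
    rw [takeRunAux, dif_neg hnc]
  | succ m ih =>
    intro a b l h
    by_cases hc : 0 < a ∧ PySem.Int.mod a 2 = b
    · rw [takeRunAux, dif_pos hc]
      have h1 := pv_half_lt a hc.1
      have h2 := ih (PySem.Int.floordiv a 2) b (l + 1) (by omega)
      omega
    · rw [takeRunAux, dif_neg hc]

theorem pv_takeRun_lt (a b l : Int) (h0 : 0 < a) (hb : PySem.Int.mod a 2 = b) :
    (takeRunAux a b l).2.toNat < a.toNat := by
  rw [takeRunAux, dif_pos (⟨h0, hb⟩ : 0 < a ∧ PySem.Int.mod a 2 = b)]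
  have h1 := pv_half_lt a h0
  have h2 := pv_takeRunAux_toNat_le (PySem.Int.floordiv a 2).toNat (PySem.Int.floordiv a 2) b (l + 1) le_rfl
  omega

-- Source B's outer `while a != 0:` loop building the run list (append becomes cons recursion)
def runsO (a : Int) : List (Int × Int) :=
  if h : 0 < a then
    let b := PySem.Int.mod a 2
    let r := takeRunAux a b 0
    (b, r.1) :: runsO r.2
  else []
termination_by a.toNat
decreasing_by exact pv_takeRun_lt a (PySem.Int.mod a 2) 0 h rfl

-- Source B's _best: recursive scan of the run list, two runs at a time
def bestRuns : List (Int × Int) → Int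
  | [] => 1
  | [(_, t)] => t + 1
  | (_, t) :: (_, z) :: rest =>
    if rest ≠ [] ∧ z = 1 then max (t + (rest.headD (0, 0)).2 + 1) (bestRuns rest)
    else max (t + 1) (bestRuns rest)

def flip_bit_alt (a : Int) : Int :=
  if a = -1 then 32
  else
    let runs := runsO a
    let runs' := if runs ≠ [] ∧ (runs.headD (0, 0)).1 = 0 then runs.tail else runs
    bestRuns runs'

-- ===== PRECONDITION & SPEC =====
-- A returns exactly on a = -1 and a ≥ 0: for every other a its while-loop never terminates
-- (a >> 1 keeps a negative int negative), so Pre_ excludes exactly those inputs.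
def Pre_flip_bit (a : Int) : Prop := a = -1 ∨ 0 ≤ a
instance (a : Int) : Decidable (Pre_flip_bit a) := by unfold Pre_flip_bit; infer_instance
def pvWitness_flip_bit : Int := (1775)

def Spec_flip_bit (a : Int) (out : Int) : Prop := out = flip_bit_alt a
instance (a : Int) (out : Int) : Decidable (Spec_flip_bit a out) := by unfold Spec_flip_bit; infer_instance

-- ===== CLAIM (what is proved, stated in full; the proofs are below) =====
def Claim_equal_flip_bit : Prop := ∀ (a : Int), Dom_flip_bit a → Pre_flip_bit a → Spec_flip_bit a (flip_bit a)

-- ===== LEMMAS AND PROOFS =====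

theorem pv_fd (a : Int) : PySem.Int.floordiv a 2 = a / 2 :=
  PySem.Int.floordiv_eq_ediv_of_pos (by norm_num)
theorem pv_md (a : Int) : PySem.Int.mod a 2 = a % 2 :=
  PySem.Int.mod_eq_emod_of_pos (by norm_num)

theorem takeRunAux_step (a b l : Int) (h : 0 < a ∧ PySem.Int.mod a 2 = b) :
    takeRunAux a b l = takeRunAux (PySem.Int.floordiv a 2) b (l + 1) := by
  rw [takeRunAux, dif_pos h]

theorem takeRunAux_base (a b l : Int) (h : ¬(0 < a ∧ PySem.Int.mod a 2 = b)) :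
    (takeRunAux a b l).1 = l ∧ (takeRunAux a b l).2 = a := by
  rw [takeRunAux, dif_neg h]; exact ⟨rfl, rfl⟩

theorem flipLoopA_base (a cur prev maxl : Int) (h0 : ¬ 0 < a) :
    flipLoopA a cur prev maxl = maxl := by
  rw [flipLoopA, dif_neg h0]

theorem flipLoopA_odd (a cur prev maxl : Int) (h0 : 0 < a) (hb : PySem.Int.mod a 2 = 1) :
    flipLoopA a cur prev maxl =
      flipLoopA (PySem.Int.floordiv a 2) (cur + 1) prev (max (prev + (cur + 1) + 1) maxl) := by
  rw [flipLoopA, dif_pos h0, if_pos hb]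

theorem flipLoopA_even (a cur prev maxl : Int) (h0 : 0 < a) (hb : ¬ PySem.Int.mod a 2 = 1) :
    flipLoopA a cur prev maxl =
      flipLoopA (PySem.Int.floordiv a 2) 0
        (if PySem.Int.mod (PySem.Int.floordiv a 2) 2 = 0 then 0 else cur)
        (max ((if PySem.Int.mod (PySem.Int.floordiv a 2) 2 = 0 then 0 else cur) + 0 + 1) maxl) := by
  rw [flipLoopA, dif_pos h0, if_neg hb]

theorem runsO_base (a : Int) (h0 : ¬ 0 < a) : runsO a = [] := by
  rw [runsO, dif_neg h0]

theorem runsO_step (a : Int) (h0 : 0 < a) :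
    runsO a = (PySem.Int.mod a 2, (takeRunAux a (PySem.Int.mod a 2) 0).1) ::
      runsO (takeRunAux a (PySem.Int.mod a 2) 0).2 := by
  rw [runsO, dif_pos h0]

-- W: the "future contribution" of A's loop with max_length factored out
def W (a cur prev : Int) : Int :=
  if h : 0 < a then
    if PySem.Int.mod a 2 = 1 then
      max (prev + cur + 2) (W (PySem.Int.floordiv a 2) (cur + 1) prev)
    else
      let p' := if PySem.Int.mod (PySem.Int.floordiv a 2) 2 = 0 then 0 else cur
      max (p' + 1) (W (PySem.Int.floordiv a 2) 0 p')
  else prev + cur + 1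
termination_by a.toNat
decreasing_by all_goals exact pv_half_lt a h

theorem W_base (a cur prev : Int) (h0 : ¬ 0 < a) : W a cur prev = prev + cur + 1 := by
  rw [W, dif_neg h0]

theorem W_odd (a cur prev : Int) (h0 : 0 < a) (hb : PySem.Int.mod a 2 = 1) :
    W a cur prev = max (prev + cur + 2) (W (PySem.Int.floordiv a 2) (cur + 1) prev) := by
  rw [W, dif_pos h0, if_pos hb]

theorem W_even (a cur prev : Int) (h0 : 0 < a) (hb : ¬ PySem.Int.mod a 2 = 1) :
    W a cur prev =
      max ((if PySem.Int.mod (PySem.Int.floordiv a 2) 2 = 0 then 0 else cur) + 1)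
        (W (PySem.Int.floordiv a 2) 0
          (if PySem.Int.mod (PySem.Int.floordiv a 2) 2 = 0 then 0 else cur)) := by
  rw [W, dif_pos h0, if_neg hb]

theorem pv_Wodd_ge (a cur prev : Int) (h0 : 0 < a) (hb : PySem.Int.mod a 2 = 1) :
    prev + cur + 2 ≤ W a cur prev := by
  rw [W_odd a cur prev h0 hb]
  simp only [max_def]; split_ifs <;> omega

-- A's loop equals max maxl (W …) under its invariants
theorem pv_A1 : ∀ (n : Nat) (a cur prev maxl : Int), a.toNat ≤ n →
    0 ≤ cur → 0 ≤ prev → prev + cur + 1 ≤ maxl →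
    flipLoopA a cur prev maxl = max maxl (W a cur prev) := by
  intro n
  induction n with
  | zero =>
    intro a cur prev maxl h hc hp hm
    have h0 : ¬ 0 < a := by omega
    rw [flipLoopA_base a cur prev maxl h0, W_base a cur prev h0]
    simp only [max_def]; split_ifs <;> omega
  | succ m ih =>
    intro a cur prev maxl h hc hp hm
    by_cases h0 : 0 < a
    · have hlt := pv_half_lt a h0
      by_cases hb : PySem.Int.mod a 2 = 1
      · rw [flipLoopA_odd a cur prev maxl h0 hb, W_odd a cur prev h0 hb]
        rw [ih (PySem.Int.floordiv a 2) (cur + 1) prev (max (prev + (cur + 1) + 1) maxl)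
          (by omega) (by omega) hp (by simp only [max_def]; split_ifs <;> omega)]
        simp only [max_def]; split_ifs <;> omega
      · rw [flipLoopA_even a cur prev maxl h0 hb, W_even a cur prev h0 hb]
        by_cases h2 : PySem.Int.mod (PySem.Int.floordiv a 2) 2 = 0
        · rw [if_pos h2]
          rw [ih (PySem.Int.floordiv a 2) 0 0 (max ((0 : Int) + 0 + 1) maxl)
            (by omega) le_rfl le_rfl (by simp only [max_def]; split_ifs <;> omega)]
          simp only [max_def]; split_ifs <;> omega
        · rw [if_neg h2]
          rw [ih (PySem.Int.floordiv a 2) 0 cur (max (cur + 0 + 1) maxl)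
            (by omega) le_rfl hc (by simp only [max_def]; split_ifs <;> omega)]
          simp only [max_def]; split_ifs <;> omega
    · rw [flipLoopA_base a cur prev maxl h0, W_base a cur prev h0]
      simp only [max_def]; split_ifs <;> omega

theorem pv_takeRunAux_offset : ∀ (n : Nat) (a b l : Int), a.toNat ≤ n →
    (takeRunAux a b l).1 = l + (takeRunAux a b 0).1 ∧
    (takeRunAux a b l).2 = (takeRunAux a b 0).2 := by
  intro n
  induction n with
  | zero =>
    intro a b l h
    have hnc : ¬(0 < a ∧ PySem.Int.mod a 2 = b) := fun hc => by omega
    rw [(takeRunAux_base a b l hnc).1, (takeRunAux_base a b l hnc).2,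
      (takeRunAux_base a b 0 hnc).1, (takeRunAux_base a b 0 hnc).2]
    exact ⟨by omega, rfl⟩
  | succ m ih =>
    intro a b l h
    by_cases hc : 0 < a ∧ PySem.Int.mod a 2 = b
    · have hlt := pv_half_lt a hc.1
      rw [takeRunAux_step a b l hc, takeRunAux_step a b 0 hc]
      have h1 := ih (PySem.Int.floordiv a 2) b (l + 1) (by omega)
      have h2 := ih (PySem.Int.floordiv a 2) b (0 + 1) (by omega)
      exact ⟨by omega, by rw [h1.2, h2.2]⟩
    · rw [(takeRunAux_base a b l hc).1, (takeRunAux_base a b l hc).2,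
        (takeRunAux_base a b 0 hc).1, (takeRunAux_base a b 0 hc).2]
      exact ⟨by omega, rfl⟩

theorem pv_takeRunAux_fst_nonneg : ∀ (n : Nat) (a b l : Int), a.toNat ≤ n → 0 ≤ l →
    0 ≤ (takeRunAux a b l).1 := by
  intro n
  induction n with
  | zero =>
    intro a b l h hl
    have hnc : ¬(0 < a ∧ PySem.Int.mod a 2 = b) := fun hc => by omega
    rw [(takeRunAux_base a b l hnc).1]; exact hl
  | succ m ih =>
    intro a b l h hl
    by_cases hc : 0 < a ∧ PySem.Int.mod a 2 = b
    · have hlt := pv_half_lt a hc.1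
      rw [takeRunAux_step a b l hc]
      exact ih (PySem.Int.floordiv a 2) b (l + 1) (by omega) (by omega)
    · rw [(takeRunAux_base a b l hc).1]; exact hl

theorem pv_takeRun_fst_pos (a b : Int) (h0 : 0 < a) (hb : PySem.Int.mod a 2 = b) :
    1 ≤ (takeRunAux a b 0).1 := by
  rw [takeRunAux_step a b 0 ⟨h0, hb⟩,
    (pv_takeRunAux_offset (PySem.Int.floordiv a 2).toNat (PySem.Int.floordiv a 2) b (0 + 1) le_rfl).1]
  have h1 := pv_takeRunAux_fst_nonneg (PySem.Int.floordiv a 2).toNat (PySem.Int.floordiv a 2) b 0 le_rfl le_rfl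
  omega

theorem pv_takeRunAux_stop : ∀ (n : Nat) (a b : Int), a.toNat ≤ n → 0 ≤ a →
    0 ≤ (takeRunAux a b 0).2 ∧
    ¬(0 < (takeRunAux a b 0).2 ∧ PySem.Int.mod (takeRunAux a b 0).2 2 = b) := by
  intro n
  induction n with
  | zero =>
    intro a b h hge
    have hnc : ¬(0 < a ∧ PySem.Int.mod a 2 = b) := fun hc => by omega
    rw [(takeRunAux_base a b 0 hnc).2]
    exact ⟨hge, hnc⟩
  | succ m ih =>
    intro a b h hge
    by_cases hc : 0 < a ∧ PySem.Int.mod a 2 = b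
    · have hlt := pv_half_lt a hc.1
      rw [takeRunAux_step a b 0 hc,
        (pv_takeRunAux_offset (PySem.Int.floordiv a 2).toNat (PySem.Int.floordiv a 2) b (0 + 1) le_rfl).2]
      exact ih (PySem.Int.floordiv a 2) b (by omega) (by rw [pv_fd]; omega)
    · rw [(takeRunAux_base a b 0 hc).2]
      exact ⟨hge, hc⟩

-- chunk lemma: W consumes a whole run of 1-bits at once
theorem pv_C1 : ∀ (n : Nat) (a : Int), a.toNat ≤ n → 0 < a → PySem.Int.mod a 2 = 1 →
    ∀ cur prev : Int,
    W a cur prev = max (prev + cur + (takeRunAux a 1 0).1 + 1)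
      (W (takeRunAux a 1 0).2 (cur + (takeRunAux a 1 0).1) prev) := by
  intro n
  induction n with
  | zero => intro a h h0 _; exfalso; omega
  | succ m ih =>
    intro a h h0 hb cur prev
    have hlt := pv_half_lt a h0
    rw [W_odd a cur prev h0 hb, takeRunAux_step a 1 0 ⟨h0, hb⟩,
      (pv_takeRunAux_offset (PySem.Int.floordiv a 2).toNat (PySem.Int.floordiv a 2) 1 (0 + 1) le_rfl).1,
      (pv_takeRunAux_offset (PySem.Int.floordiv a 2).toNat (PySem.Int.floordiv a 2) 1 (0 + 1) le_rfl).2]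
    by_cases h2 : 0 < PySem.Int.floordiv a 2 ∧ PySem.Int.mod (PySem.Int.floordiv a 2) 2 = 1
    · have hfst := pv_takeRunAux_fst_nonneg (PySem.Int.floordiv a 2).toNat (PySem.Int.floordiv a 2) 1 0 le_rfl le_rfl
      rw [ih (PySem.Int.floordiv a 2) (by omega) h2.1 h2.2 (cur + 1) prev]
      have he : cur + (0 + 1 + (takeRunAux (PySem.Int.floordiv a 2) 1 0).1) =
          cur + 1 + (takeRunAux (PySem.Int.floordiv a 2) 1 0).1 := by ring
      rw [he]
      simp only [max_def]; split_ifs <;> omega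
    · rw [(takeRunAux_base (PySem.Int.floordiv a 2) 1 0 h2).1,
        (takeRunAux_base (PySem.Int.floordiv a 2) 1 0 h2).2]
      have he : cur + (0 + 1 + (0 : Int)) = cur + 1 := by ring
      rw [he]
      simp only [max_def]; split_ifs <;> omega

-- chunk lemma: W consumes a whole run of 0-bits at once; the value after it is odd
theorem pv_C2 : ∀ (n : Nat) (a : Int), a.toNat ≤ n → 0 < a → PySem.Int.mod a 2 = 0 →
    ∀ cur prev : Int,
    0 < (takeRunAux a 0 0).2 ∧ PySem.Int.mod (takeRunAux a 0 0).2 2 = 1 ∧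
    W a cur prev = W (takeRunAux a 0 0).2 0 (if (takeRunAux a 0 0).1 = 1 then cur else 0) := by
  intro n
  induction n with
  | zero => intro a h h0 _; exfalso; omega
  | succ m ih =>
    intro a h h0 hb cur prev
    have hlt := pv_half_lt a h0
    have hq0 : 0 < PySem.Int.floordiv a 2 := by rw [pv_fd]; rw [pv_md] at hb; omega
    have hb' : ¬ PySem.Int.mod a 2 = 1 := by rw [hb]; norm_num
    rw [takeRunAux_step a 0 0 ⟨h0, hb⟩,
      (pv_takeRunAux_offset (PySem.Int.floordiv a 2).toNat (PySem.Int.floordiv a 2) 0 (0 + 1) le_rfl).1,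
      (pv_takeRunAux_offset (PySem.Int.floordiv a 2).toNat (PySem.Int.floordiv a 2) 0 (0 + 1) le_rfl).2]
    by_cases h2 : PySem.Int.mod (PySem.Int.floordiv a 2) 2 = 0
    · obtain ⟨hpos, hodd, hWq⟩ := ih (PySem.Int.floordiv a 2) (by omega) hq0 h2 0 0
      rw [ite_self (0 : Int)] at hWq
      have hfge := pv_takeRun_fst_pos (PySem.Int.floordiv a 2) 0 hq0 h2
      refine ⟨hpos, hodd, ?_⟩
      rw [W_even a cur prev h0 hb', if_pos h2, hWq]
      have hne : ¬ ((0 : Int) + 1 + (takeRunAux (PySem.Int.floordiv a 2) 0 0).1 = 1) := by omega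
      rw [if_neg hne]
      have hge2 := pv_Wodd_ge (takeRunAux (PySem.Int.floordiv a 2) 0 0).2 0 0 hpos hodd
      simp only [max_def]; split_ifs <;> omega
    · have hqodd : PySem.Int.mod (PySem.Int.floordiv a 2) 2 = 1 := by
        rw [pv_md] at h2 ⊢; omega
      have hbase := takeRunAux_base (PySem.Int.floordiv a 2) 0 0 (fun hc => h2 hc.2)
      rw [hbase.1, hbase.2]
      refine ⟨hq0, hqodd, ?_⟩
      rw [W_even a cur prev h0 hb', if_neg h2]
      have he : ((0 : Int) + 1 + 0 = 1) := by norm_num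
      rw [if_pos he]
      have hge2 := pv_Wodd_ge (PySem.Int.floordiv a 2) 0 cur hq0 hqodd
      simp only [max_def]; split_ifs <;> omega

theorem bestRuns_one (b t : Int) : bestRuns [(b, t)] = t + 1 := by
  simp [bestRuns]

theorem bestRuns_cons3 (b1 t b2 z b3 u : Int) (rest : List (Int × Int)) :
    bestRuns ((b1, t) :: (b2, z) :: (b3, u) :: rest) =
      if z = 1 then max (t + u + 1) (bestRuns ((b3, u) :: rest))
      else max (t + 1) (bestRuns ((b3, u) :: rest)) := by
  by_cases hz : z = 1 <;> simp [bestRuns, hz]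

-- main run-list lemma: W on a run boundary equals the merge scan of the run list
theorem pv_KEY : ∀ (n : Nat) (a : Int), a.toNat ≤ n → 0 < a → PySem.Int.mod a 2 = 1 →
    ∀ prev : Int, 0 ≤ prev →
    W a 0 prev = max (prev + (takeRunAux a 1 0).1 + 1) (bestRuns (runsO a)) ∧
    (takeRunAux a 1 0).1 + 1 ≤ bestRuns (runsO a) := by
  intro n
  induction n with
  | zero => intro a h h0 _; exfalso; omega
  | succ m ih =>
    intro a h h0 hb prev hp
    have hlt := pv_takeRun_lt a 1 0 h0 hb
    have hfst := pv_takeRunAux_fst_nonneg a.toNat a 1 0 le_rfl le_rfl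
    have hC1 := pv_C1 a.toNat a le_rfl h0 hb 0 prev
    have hstop := pv_takeRunAux_stop a.toNat a 1 le_rfl (by omega)
    have hrO := runsO_step a h0
    rw [hb] at hrO
    by_cases ha' : (takeRunAux a 1 0).2 = 0
    · rw [ha'] at hC1
      rw [W_base 0 (0 + (takeRunAux a 1 0).1) prev (by omega)] at hC1
      rw [ha'] at hrO
      rw [runsO_base 0 (by omega)] at hrO
      constructor
      · rw [hC1, hrO, bestRuns_one]
        simp only [max_def]; split_ifs <;> omega
      · rw [hrO, bestRuns_one]
    · have h1pos : 0 < (takeRunAux a 1 0).2 := by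
        have := hstop.1; omega
      have h1even : PySem.Int.mod (takeRunAux a 1 0).2 2 = 0 := by
        have h3 := hstop.2
        rw [pv_md]; rw [pv_md] at h3; omega
      obtain ⟨hz2pos, hz2odd, hW2⟩ :=
        pv_C2 a.toNat (takeRunAux a 1 0).2 (by omega) h1pos h1even (0 + (takeRunAux a 1 0).1) prev
      have hlt2 := pv_takeRun_lt (takeRunAux a 1 0).2 0 0 h1pos h1even
      have hfstu := pv_takeRunAux_fst_nonneg (takeRunAux (takeRunAux a 1 0).2 0 0).2.toNat
        (takeRunAux (takeRunAux a 1 0).2 0 0).2 1 0 le_rfl le_rfl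
      obtain ⟨hWeq, hge⟩ := ih (takeRunAux (takeRunAux a 1 0).2 0 0).2 (by omega) hz2pos hz2odd
        (if (takeRunAux (takeRunAux a 1 0).2 0 0).1 = 1 then 0 + (takeRunAux a 1 0).1 else 0)
        (by split <;> omega)
      have hrO' := runsO_step (takeRunAux a 1 0).2 h1pos
      rw [h1even] at hrO'
      have hrO'' := runsO_step (takeRunAux (takeRunAux a 1 0).2 0 0).2 hz2pos
      rw [hz2odd] at hrO''
      rw [hrO''] at hWeq hge
      constructor
      · rw [hC1, hW2, hWeq, hrO, hrO', hrO'', bestRuns_cons3]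
        by_cases hs1 : (takeRunAux (takeRunAux a 1 0).2 0 0).1 = 1
        · rw [if_pos hs1, if_pos hs1]
          simp only [max_def]; split_ifs <;> omega
        · rw [if_neg hs1, if_neg hs1]
          simp only [max_def] at hge ⊢; split_ifs at hge ⊢ <;> omega
      · rw [hrO, hrO', hrO'', bestRuns_cons3]
        by_cases hs1 : (takeRunAux (takeRunAux a 1 0).2 0 0).1 = 1
        · rw [if_pos hs1]
          simp only [max_def]; split_ifs <;> omega
        · rw [if_neg hs1]
          simp only [max_def]; split_ifs <;> omega

-- ===== VERDICT (by name: the statement is the Claim_ definition above) =====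
theorem flip_bit_spec : Claim_equal_flip_bit := by
  unfold Claim_equal_flip_bit
  intro a _ hpre
  unfold Spec_flip_bit flip_bit flip_bit_alt
  by_cases hm1 : a = -1
  · rw [if_pos hm1, if_pos hm1]
  · rw [if_neg hm1, if_neg hm1]
    have ha : 0 ≤ a := by rcases hpre with h | h <;> omega
    show flipLoopA a 0 0 1 =
      bestRuns (if runsO a ≠ [] ∧ ((runsO a).headD (0, 0)).1 = 0 then (runsO a).tail else runsO a)
    by_cases h0 : 0 < a
    · have hA := pv_A1 a.toNat a 0 0 1 le_rfl le_rfl le_rfl (by omega)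
      rw [hA]
      have hmd : PySem.Int.mod a 2 = 1 ∨ PySem.Int.mod a 2 = 0 := by rw [pv_md]; omega
      rcases hmd with hb | hb
      · -- odd a: the run list starts with a 1-run, nothing is dropped
        have hrO := runsO_step a h0
        rw [hb] at hrO
        obtain ⟨hW, hge⟩ := pv_KEY a.toNat a le_rfl h0 hb 0 le_rfl
        have hfst := pv_takeRunAux_fst_nonneg a.toNat a 1 0 le_rfl le_rfl
        have hcond : ¬(runsO a ≠ [] ∧ ((runsO a).headD (0, 0)).1 = 0) := by
          intro hcc
          have hx := hcc.2
          rw [hrO] at hx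
          simp at hx
        rw [if_neg hcond, hW]
        simp only [max_def]; split_ifs <;> omega
      · -- even a: the leading 0-run is dropped
        obtain ⟨hz2pos, hz2odd, hW2⟩ := pv_C2 a.toNat a le_rfl h0 hb 0 0
        rw [ite_self (0 : Int)] at hW2
        obtain ⟨hWK, hgeK⟩ := pv_KEY (takeRunAux a 0 0).2.toNat (takeRunAux a 0 0).2 le_rfl
          hz2pos hz2odd 0 le_rfl
        have hfstu := pv_takeRunAux_fst_nonneg (takeRunAux a 0 0).2.toNat (takeRunAux a 0 0).2
          1 0 le_rfl le_rfl
        have hrO := runsO_step a h0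
        rw [hb] at hrO
        have hcond : runsO a ≠ [] ∧ ((runsO a).headD (0, 0)).1 = 0 := by
          rw [hrO]; simp
        rw [if_pos hcond, hrO]
        simp only [List.tail_cons]
        rw [hW2, hWK]
        simp only [max_def]; split_ifs <;> omega
    · have ha0 : a = 0 := by omega
      subst ha0
      rw [flipLoopA_base 0 0 0 1 (by omega), runsO_base 0 (by omega)]
      simp [bestRuns]
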